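-- pv_equiv track=rewrite | github.com/pypi-data/pypi-mirror-396 | packages/openmv/openmv-1.0.3-py3-none-any.whl/openmv/profiler.py | addr_to_symbol
-- ===== SOURCE A (Python) =====
-- def addr_to_symbol(symbols, address):
--     """Binary search for symbol name by address.
--
--     Args:
--         symbols: List of (start, end, name) tuples sorted by start address
--         address: Address to look up
--
--     Returns:
--         Symbol name or None if not found
--     """
--     lo, hi = 0, len(symbols) - 1
--     while lo <= hi:
--         mid = (lo + hi) // 2
--         start, end, name = symbols[mid]
--         if start <= address < end:
--             return name
--         elif address < start:
--             hi = mid - 1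
--         else:
--             lo = mid + 1
--     return None
-- ===== SOURCE B (Python) =====
-- def addr_to_symbol(symbols, address):
--     """Binary search by recursion on list slices instead of an index loop."""
--     def search(syms):
--         if not syms:
--             return None
--         m = (len(syms) - 1) // 2
--         start, end, name = syms[m]
--         if start <= address < end:
--             return name
--         if address < start:
--             return search(syms[:m])
--         return search(syms[m + 1:])
--     return search(symbols)
-- ===== Notes on version B (the rewrite author's own statement) =====
-- stated objective: alternative
-- what changed: Replaces A's in-place while-loop over a (lo, hi) index pair with a recursive helper that searches ever-smaller list slices (syms[:m] / syms[m+1:]), probing the same elements in the same order.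
import Mathlib
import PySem

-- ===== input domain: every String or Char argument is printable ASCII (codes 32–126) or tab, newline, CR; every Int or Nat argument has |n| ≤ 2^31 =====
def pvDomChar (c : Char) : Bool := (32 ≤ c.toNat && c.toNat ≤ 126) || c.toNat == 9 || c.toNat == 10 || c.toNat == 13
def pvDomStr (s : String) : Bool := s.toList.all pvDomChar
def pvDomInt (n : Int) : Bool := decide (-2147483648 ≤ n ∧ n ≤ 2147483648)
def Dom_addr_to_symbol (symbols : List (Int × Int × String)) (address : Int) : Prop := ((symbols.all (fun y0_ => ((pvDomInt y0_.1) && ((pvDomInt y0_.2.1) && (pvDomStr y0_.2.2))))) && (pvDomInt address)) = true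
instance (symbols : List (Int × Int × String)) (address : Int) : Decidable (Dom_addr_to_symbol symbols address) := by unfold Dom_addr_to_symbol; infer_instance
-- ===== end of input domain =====

-- B replaces A's index-pair while-loop with recursion on list slices (alternative decomposition; same probe sequence).

-- ===== PORT A =====
-- A's while-loop over (lo, hi); mid = (lo+hi)//2 is written inline.
-- The pyGet? 'none' (IndexError) branch is unreachable for A's callers (0 ≤ lo, hi < len).
def addr_to_symbol.loop (symbols : List (Int × Int × String)) (address : Int) (lo hi : Int) :
    Option String :=
  if h : lo ≤ hi then
    match PySem.List.pyGet? symbols (PySem.Int.floordiv (lo + hi) 2) with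
    | none => none
    | some (s, e, name) =>
      if s ≤ address ∧ address < e then some name
      else if address < s then
        addr_to_symbol.loop symbols address lo (PySem.Int.floordiv (lo + hi) 2 - 1)
      else
        addr_to_symbol.loop symbols address (PySem.Int.floordiv (lo + hi) 2 + 1) hi
  else none
termination_by (hi + 1 - lo).toNat
decreasing_by
  · have hm := PySem.Int.floordiv_two_mid_bounds h
    have hb : 0 < hi + 1 - lo := Int.sub_pos.mpr (Int.lt_add_one_of_le h)
    rw [Int.sub_add_cancel]
    exact (Int.toNat_lt_toNat hb).mpr
      (sub_lt_sub_right (Int.lt_add_one_of_le hm.2) lo)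
  · have hm := PySem.Int.floordiv_two_mid_bounds h
    have hb : 0 < hi + 1 - lo := Int.sub_pos.mpr (Int.lt_add_one_of_le h)
    exact (Int.toNat_lt_toNat hb).mpr
      (sub_lt_sub_left (Int.lt_add_one_of_le hm.1) (hi + 1))

def addr_to_symbol (symbols : List (Int × Int × String)) (address : Int) : Option String :=
  addr_to_symbol.loop symbols address 0 ((symbols.length : Int) - 1)

-- ===== PORT B =====
-- B's recursive helper on slices; m = (len(syms)-1)//2 is written inline.
-- The getElem? 'none' branch is unreachable ((len-1)/2 < len for nonempty syms).
def addr_to_symbol_alt.search (address : Int) (syms : List (Int × Int × String)) :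
    Option String :=
  if hne : syms = [] then none
  else
    match syms[(syms.length - 1) / 2]? with
    | none => none
    | some (s, e, name) =>
      if s ≤ address ∧ address < e then some name
      else if address < s then
        addr_to_symbol_alt.search address (syms.take ((syms.length - 1) / 2))
      else
        addr_to_symbol_alt.search address (syms.drop ((syms.length - 1) / 2 + 1))
termination_by syms.length
decreasing_by
  · have hpos : 0 < syms.length := List.length_pos_of_ne_nil hne
    exact Nat.lt_of_le_of_lt (List.length_take_le _ _)
      (Nat.lt_of_le_of_lt (Nat.div_le_self _ _) (Nat.sub_lt hpos Nat.one_pos))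
  · have hpos : 0 < syms.length := List.length_pos_of_ne_nil hne
    rw [List.length_drop]
    exact Nat.sub_lt hpos (Nat.succ_pos _)

def addr_to_symbol_alt (symbols : List (Int × Int × String)) (address : Int) : Option String :=
  addr_to_symbol_alt.search address symbols

-- ===== PRECONDITION & SPEC =====
def Spec_addr_to_symbol (symbols : List (Int × Int × String)) (address : Int) (out : Option String) : Prop := out = addr_to_symbol_alt symbols address
instance (symbols : List (Int × Int × String)) (address : Int) (out : Option String) : Decidable (Spec_addr_to_symbol symbols address out) := by unfold Spec_addr_to_symbol; infer_instance

-- ===== CLAIM (what is proved, stated in full; the proofs are below) =====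
def Claim_equal_addr_to_symbol : Prop := ∀ (symbols : List (Int × Int × String)) (address : Int), Dom_addr_to_symbol symbols address → Spec_addr_to_symbol symbols address (addr_to_symbol symbols address)

-- ===== LEMMAS AND PROOFS =====

theorem loop_eq_search (symbols : List (Int × Int × String)) (address : Int)
    (lo hi : Int) (hlo : 0 ≤ lo) (hhi : hi < (symbols.length : Int)) :
    addr_to_symbol.loop symbols address lo hi =
      addr_to_symbol_alt.search address
        ((symbols.drop lo.toNat).take (hi + 1 - lo).toNat) := by
  rw [addr_to_symbol.loop, addr_to_symbol_alt.search]
  by_cases h : lo ≤ hi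
  · have hmid := PySem.Int.floordiv_two_mid_bounds h
    rw [PySem.Int.floordiv_eq_ediv_of_pos (by omega : (0:Int) < 2)] at hmid ⊢
    have hlen : ((symbols.drop lo.toNat).take (hi + 1 - lo).toNat).length
        = (hi + 1 - lo).toNat := by
      simp [List.length_take, List.length_drop]; omega
    have hne : ¬ ((symbols.drop lo.toNat).take (hi + 1 - lo).toNat) = [] := by
      intro h0
      have := congrArg List.length h0
      rw [hlen] at this
      simp at this; omega
    have hmlt : ((hi + 1 - lo).toNat - 1) / 2 < (hi + 1 - lo).toNat := by omega
    have hgetS : ((symbols.drop lo.toNat).take (hi + 1 - lo).toNat)[((hi + 1 - lo).toNat - 1) / 2]?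
        = symbols[((lo + hi) / 2).toNat]? := by
      rw [List.getElem?_take, if_pos hmlt, List.getElem?_drop]
      congr 1; omega
    have e1 : (hi + 1 - lo).toNat - 1 = (hi - lo).toNat := by omega
    rw [dif_pos h, dif_neg hne, hlen, hgetS,
      PySem.List.pyGet?_of_nonneg symbols (by omega : (0:Int) ≤ (lo + hi) / 2)]
    cases hv : symbols[((lo + hi) / 2).toNat]? with
    | none => rfl
    | some v =>
      obtain ⟨s, e, name⟩ := v
      dsimp only
      by_cases hhit : s ≤ address ∧ address < e
      · simp [hhit]
      · rw [if_neg hhit, if_neg hhit]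
        by_cases hlt : address < s
        · have e2 : ((lo + hi) / 2 - 1 + 1 - lo).toNat
              = min ((hi - lo).toNat / 2) ((hi + 1 - lo).toNat) := by omega
          rw [if_pos hlt, if_pos hlt,
            loop_eq_search symbols address lo ((lo + hi) / 2 - 1) hlo (by omega),
            List.take_take, e1, ← e2]
        · have e3 : (hi + 1 - ((lo + hi) / 2 + 1)).toNat
              = (hi + 1 - lo).toNat - ((hi - lo).toNat / 2 + 1) := by omega
          have e4 : ((lo + hi) / 2 + 1).toNat
              = lo.toNat + ((hi - lo).toNat / 2 + 1) := by omega
          rw [if_neg hlt, if_neg hlt,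
            loop_eq_search symbols address ((lo + hi) / 2 + 1) hi (by omega) hhi,
            List.drop_take, List.drop_drop, e1, e3, e4]
  · rw [dif_neg h, dif_pos]
    have h0 : (hi + 1 - lo).toNat = 0 := by omega
    rw [h0]; simp
termination_by (hi + 1 - lo).toNat
decreasing_by all_goals omega

-- ===== VERDICT (by name: the statement is the Claim_ definition above) =====
theorem addr_to_symbol_spec : Claim_equal_addr_to_symbol := by
  intro symbols address _
  unfold Spec_addr_to_symbol addr_to_symbol addr_to_symbol_alt
  rw [loop_eq_search symbols address 0 ((symbols.length : Int) - 1) le_rfl (by omega)]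
  congr 1
  have hL : ((symbols.length : Int) - 1 + 1 - 0).toNat = symbols.length := by omega
  rw [hL]
  simp
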